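-- pv_equiv track=rewrite | github.com/VeroshaKriyanjala/Standarizer | 4_2_fix_csi_env_names_uat.py | find_onering_name
-- ===== SOURCE A (Python) =====
-- def find_onering_name(service_folder_name, onering_names):
--     """Find the matching onering repo name for a service folder.
--
--     Tries:
--     1. Exact match
--     2. Hyphen/underscore/dot substitution
--     3. Normalized comparison (strip hyphens/underscores/dots)
--     4. Partial/substring match (longest wins)
--     """
--     if service_folder_name in onering_names:
--         return service_folder_name
--
--     # Hyphen <-> underscore
--     alt = service_folder_name.replace("-", "_")
--     if alt in onering_names:
--         return alt
--     alt = service_folder_name.replace("_", "-")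
--     if alt in onering_names:
--         return alt
--
--     # Dot <-> hyphen (e.g. csi.uif.admin.ui -> csi-uif-admin-ui)
--     alt = service_folder_name.replace("-", ".")
--     if alt in onering_names:
--         return alt
--
--     # Normalized comparison
--     best_match = None
--     best_score = 0
--     norm_folder = service_folder_name.replace("-", "").replace("_", "").replace(".", "").lower()
--     for name in onering_names:
--         norm_name = name.replace("-", "").replace("_", "").replace(".", "").lower()
--         if norm_folder == norm_name:
--             return name
--         if norm_folder in norm_name or norm_name in norm_folder:
--             score = min(len(norm_folder), len(norm_name))
--             if score > best_score:
--                 best_score = score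
--                 best_match = name
--
--     return best_match
-- ===== SOURCE B (Python) =====
-- def _norm(s):
--     return s.replace("-", "").replace("_", "").replace(".", "").lower()
--
--
-- def find_onering_name(service_folder_name, onering_names):
--     """Find the matching onering repo name for a service folder.
--
--     Two-phase rewrite: first try the exact-name candidates, then a
--     normalized-equality pass, and only if both fail a longest-substring pass.
--     """
--     candidates = [
--         service_folder_name,
--         service_folder_name.replace("-", "_"),
--         service_folder_name.replace("_", "-"),
--         service_folder_name.replace("-", "."),
--     ]
--     hit = next((c for c in candidates if c in onering_names), None)
--     if hit is not None:
--         return hit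
--
--     nf = _norm(service_folder_name)
--     exact = next((n for n in onering_names if _norm(n) == nf), None)
--     if exact is not None:
--         return exact
--
--     best, best_score = None, 0
--     for name in onering_names:
--         nn = _norm(name)
--         if (nf in nn or nn in nf) and min(len(nf), len(nn)) > best_score:
--             best, best_score = name, min(len(nf), len(nn))
--     return best
-- ===== Notes on version B (the rewrite author's own statement) =====
-- stated objective: simpler
-- what changed: A's single combined normalization loop (equality return interleaved with substring best-score accumulation) is split into two sequential passes -- a first-normalized-equal search, then a separate longest-substring fold -- and the four exact-candidate checks become one search over a candidate list.
import Mathlib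
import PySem

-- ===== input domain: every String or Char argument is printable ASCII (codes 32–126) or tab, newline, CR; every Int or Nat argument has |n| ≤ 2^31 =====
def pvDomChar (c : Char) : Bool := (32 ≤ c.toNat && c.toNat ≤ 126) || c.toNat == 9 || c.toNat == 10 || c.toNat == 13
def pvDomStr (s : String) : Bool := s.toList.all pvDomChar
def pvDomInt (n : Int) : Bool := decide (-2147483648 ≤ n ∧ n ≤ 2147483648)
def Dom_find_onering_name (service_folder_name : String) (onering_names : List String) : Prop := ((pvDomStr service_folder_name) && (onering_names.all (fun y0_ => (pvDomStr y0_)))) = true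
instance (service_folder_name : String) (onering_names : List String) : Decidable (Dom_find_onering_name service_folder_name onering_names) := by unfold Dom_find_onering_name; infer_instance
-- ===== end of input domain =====

-- B is a simpler decomposition of A: the combined normalize-and-score loop is split into an
-- equality pass then a substring-score fold, and the exact-candidate checks become one list search.

-- shared pure helper: s.replace("-","").replace("_","").replace(".","").lower()
def pvNorm (s : String) : String :=
  PySem.Str.lower (PySem.Str.replace (PySem.Str.replace (PySem.Str.replace s "-" "") "_" "") "." "")

-- ===== PORT A =====
-- A's single loop: returns on normalized equality, otherwise accumulates (best_match, best_score)
def findA_loop (nf : String) (names : List String) (best : Option String) (bestScore : Int) : Option String :=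
  match names with
  | [] => best
  | n :: rest =>
    let nn := pvNorm n
    if nf = nn then some n
    else if PySem.Str.isIn nf nn || PySem.Str.isIn nn nf then
      let score := min (PySem.Str.len nf) (PySem.Str.len nn)
      if bestScore < score then findA_loop nf rest (some n) score
      else findA_loop nf rest best bestScore
    else findA_loop nf rest best bestScore

def find_onering_name (service_folder_name : String) (onering_names : List String) : Option String :=
  if onering_names.contains service_folder_name then some service_folder_name
  else
    let alt1 := PySem.Str.replace service_folder_name "-" "_"
    if onering_names.contains alt1 then some alt1
    else
      let alt2 := PySem.Str.replace service_folder_name "_" "-"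
      if onering_names.contains alt2 then some alt2
      else
        let alt3 := PySem.Str.replace service_folder_name "-" "."
        if onering_names.contains alt3 then some alt3
        else findA_loop (pvNorm service_folder_name) onering_names none 0

-- ===== PORT B =====
-- B's substring pass: a fold carrying (best, best_score)
def findB_step (nf : String) (acc : Option String × Int) (n : String) : Option String × Int :=
  let nn := pvNorm n
  if (PySem.Str.isIn nf nn || PySem.Str.isIn nn nf) && acc.2 < min (PySem.Str.len nf) (PySem.Str.len nn)
  then (some n, min (PySem.Str.len nf) (PySem.Str.len nn))
  else acc

def find_onering_name_alt (service_folder_name : String) (onering_names : List String) : Option String :=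
  let candidates := [service_folder_name,
                     PySem.Str.replace service_folder_name "-" "_",
                     PySem.Str.replace service_folder_name "_" "-",
                     PySem.Str.replace service_folder_name "-" "."]
  match candidates.find? (fun c => onering_names.contains c) with
  | some c => some c
  | none =>
    let nf := pvNorm service_folder_name
    match onering_names.find? (fun n => pvNorm n == nf) with
    | some n => some n
    | none => (onering_names.foldl (findB_step nf) (none, 0)).1

-- ===== PRECONDITION & SPEC =====
def Spec_find_onering_name (service_folder_name : String) (onering_names : List String) (out : Option String) : Prop := out = find_onering_name_alt service_folder_name onering_names
instance (service_folder_name : String) (onering_names : List String) (out : Option String) : Decidable (Spec_find_onering_name service_folder_name onering_names out) := by unfold Spec_find_onering_name; infer_instance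

-- ===== CLAIM (what is proved, stated in full; the proofs are below) =====
def Claim_equal_find_onering_name : Prop := ∀ (service_folder_name : String) (onering_names : List String), Dom_find_onering_name service_folder_name onering_names → Spec_find_onering_name service_folder_name onering_names (find_onering_name service_folder_name onering_names)

-- ===== LEMMAS AND PROOFS =====

-- A's combined loop = first-normalized-equal search, else B's substring fold.
theorem findA_loop_eq (nf : String) (names : List String) :
    ∀ (best : Option String) (bestScore : Int),
      findA_loop nf names best bestScore =
        match names.find? (fun n => pvNorm n == nf) with
        | some n => some n
        | none => (names.foldl (findB_step nf) (best, bestScore)).1 := by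
  induction names with
  | nil => intro best bestScore; simp [findA_loop]
  | cons n rest ih =>
    intro best bestScore
    by_cases heq : nf = pvNorm n
    · have hp : ((fun m => pvNorm m == nf) n) = true := by simp [heq]
      rw [List.find?_cons_of_pos (p := fun m => pvNorm m == nf) (l := rest) hp]
      simp only [findA_loop]
      rw [if_pos heq]
    · have hne : ¬ (((fun m => pvNorm m == nf) n) = true) := by simp [Ne.symm heq]
      rw [List.find?_cons_of_neg (p := fun m => pvNorm m == nf) (l := rest) hne, List.foldl_cons]
      simp only [findA_loop]
      rw [if_neg heq]
      by_cases hsub : (PySem.Str.isIn nf (pvNorm n) || PySem.Str.isIn (pvNorm n) nf) = true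
      · rw [if_pos hsub]
        by_cases hlt : bestScore < min (PySem.Str.len nf) (PySem.Str.len (pvNorm n))
        · rw [if_pos hlt, ih]
          have hstep : findB_step nf (best, bestScore) n
              = (some n, min (PySem.Str.len nf) (PySem.Str.len (pvNorm n))) := by
            unfold findB_step
            rw [if_pos]
            simp only [hsub, Bool.true_and]
            exact decide_eq_true hlt
          rw [hstep]
        · rw [if_neg hlt, ih]
          have hstep : findB_step nf (best, bestScore) n = (best, bestScore) := by
            unfold findB_step
            rw [if_neg]
            simp only [hsub, Bool.true_and]
            exact fun hc => hlt (of_decide_eq_true hc)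
          rw [hstep]
      · rw [if_neg hsub, ih]
        have hstep : findB_step nf (best, bestScore) n = (best, bestScore) := by
          unfold findB_step
          rw [if_neg]
          intro hc
          exact hsub (Bool.and_eq_true_iff.mp hc).1
        rw [hstep]

-- ===== VERDICT (by name: the statement is the Claim_ definition above) =====
theorem find_onering_name_spec : Claim_equal_find_onering_name := by
  intro sfn names _
  unfold Spec_find_onering_name
  simp only [find_onering_name, find_onering_name_alt]
  by_cases h1 : sfn ∈ names
  · rw [List.find?_cons_of_pos (p := fun c => names.contains c) (by simpa using h1)]
    simp [h1]
  · rw [List.find?_cons_of_neg (p := fun c => names.contains c) (by simpa using h1)]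
    by_cases h2 : PySem.Str.replace sfn "-" "_" ∈ names
    · rw [List.find?_cons_of_pos (p := fun c => names.contains c) (by simpa using h2)]
      simp [h1, h2]
    · rw [List.find?_cons_of_neg (p := fun c => names.contains c) (by simpa using h2)]
      by_cases h3 : PySem.Str.replace sfn "_" "-" ∈ names
      · rw [List.find?_cons_of_pos (p := fun c => names.contains c) (by simpa using h3)]
        simp [h1, h2, h3]
      · rw [List.find?_cons_of_neg (p := fun c => names.contains c) (by simpa using h3)]
        by_cases h4 : PySem.Str.replace sfn "-" "." ∈ names
        · rw [List.find?_cons_of_pos (p := fun c => names.contains c) (by simpa using h4)]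
          simp [h1, h2, h3, h4]
        · rw [List.find?_cons_of_neg (p := fun c => names.contains c) (by simpa using h4), List.find?_nil]
          rw [if_neg (by simpa using h1), if_neg (by simpa using h2),
              if_neg (by simpa using h3), if_neg (by simpa using h4)]
          exact findA_loop_eq (pvNorm sfn) names none 0
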